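-- pv_equiv track=rewrite | github.com/aviiciii/gfg_potd | Difficulty: Medium/Maximum product subset of an array/maximum-product-subset-of-an-array.py | findMaxProduct
-- ===== SOURCE A (Python) =====
-- def findMaxProduct(arr):
--
--     MOD = 10**9 +7
--     # Write your code here
--     if len(arr) == 1:
--         return arr[0]
--
--     # take lowest even negatives
--     arr.sort()
--
--     negatives = [x for x in arr if x < 0]
--     positives = [x for x in arr if x > 0]
--
--     if negatives or positives:
--
--         if positives or len(negatives) >1:
--             if len(negatives) % 2 != 0:
--                 negatives.pop()
--
--         res = 1
--
--         for ele in negatives: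
--             res *= ele
--
--         for ele in positives:
--             res *= ele
--
--         if res < 0 and 0 in arr:
--             return 0
--     else:
--         return 0
--
--
--     # take all positives
--     return res % MOD
-- ===== SOURCE B (Python) =====
-- def findMaxProduct(arr):
--     MOD = 10**9 + 7
--     if len(arr) == 1:
--         return arr[0]
--     prod = 1            # modular product of nonzeros seen, excluding one copy of max_neg
--     max_neg = None      # largest (closest to zero) negative seen so far
--     neg_cnt = 0
--     has_pos = False
--     has_zero = False
--     for x in arr:
--         if x == 0:
--             has_zero = True
--         elif x > 0:
--             has_pos = True
--             prod = prod * x % MOD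
--         else:
--             neg_cnt += 1
--             if max_neg is None:
--                 max_neg = x
--             elif x > max_neg:
--                 prod = prod * max_neg % MOD
--                 max_neg = x
--             else:
--                 prod = prod * x % MOD
--     if not has_pos and neg_cnt == 0:
--         return 0
--     if not has_pos and neg_cnt == 1:
--         # best subset is the single negative alone (or a zero if present)
--         return 0 if has_zero else max_neg % MOD
--     if neg_cnt % 2 == 1:
--         return prod                     # drop the largest negative
--     return prod * max_neg % MOD if max_neg is not None else prod
-- ===== Notes on version B (the rewrite author's own statement) =====
-- stated objective: faster
-- what changed: Replaces A's sort + two filter passes + pop + exact big-integer product with a single pass that multiplies modulo 10^9+7 while tracking the largest negative, the negative count and zero/positive flags.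
import Mathlib
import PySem

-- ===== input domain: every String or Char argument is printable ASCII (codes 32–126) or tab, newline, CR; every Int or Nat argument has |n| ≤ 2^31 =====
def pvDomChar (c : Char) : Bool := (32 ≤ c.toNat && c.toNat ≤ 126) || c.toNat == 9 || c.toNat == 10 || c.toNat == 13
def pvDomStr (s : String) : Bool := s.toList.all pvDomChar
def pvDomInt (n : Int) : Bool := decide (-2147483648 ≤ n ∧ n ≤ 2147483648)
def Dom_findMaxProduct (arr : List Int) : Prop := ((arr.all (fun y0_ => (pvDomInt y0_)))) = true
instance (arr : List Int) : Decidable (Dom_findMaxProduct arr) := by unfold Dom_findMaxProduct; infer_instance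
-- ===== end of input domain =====

-- B replaces A's sort + filters + pop + exact big-integer product with one fold that tracks the
-- product of nonzeros modulo 10^9+7 (excluding the largest negative), the largest negative, the
-- negative count and zero/positive flags.
-- Note: Python A sorts its argument in place; the equivalence proved here is about the RETURN value only.

-- ===== PORT A =====
def findMaxProduct (arr : List Int) : Int :=
  let M : Int := 10 ^ 9 + 7
  if arr.length = 1 then arr.headD 0
  else
    let sortedArr := PySem.List.sorted arr (fun x => x) false
    let negatives := sortedArr.filter (fun x => decide (x < 0))
    let positives := sortedArr.filter (fun x => decide (0 < x))
    if negatives ≠ [] ∨ positives ≠ [] then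
      let negatives' :=
        if (positives ≠ [] ∨ negatives.length > 1) ∧ negatives.length % 2 ≠ 0 then
          negatives.dropLast          -- negatives.pop() : drop the last element
        else negatives
      let res := negatives'.foldl (fun r e => r * e) 1
      let res := positives.foldl (fun r e => r * e) res
      if res < 0 ∧ (0 : Int) ∈ arr then 0 else PySem.Int.mod res M
    else 0

-- ===== PORT B =====
structure BState where
  p : Int
  mn : Option Int
  c : Int
  hp : Bool
  hz : Bool
deriving Repr, DecidableEq

def bStep (s : BState) (x : Int) : BState :=
  if x = 0 then { s with hz := true }
  else if 0 < x then { s with hp := true, p := PySem.Int.mod (s.p * x) 1000000007 }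
  else
    match s.mn with
    | none => { s with c := s.c + 1, mn := some x }
    | some m =>
      if x > m then { s with c := s.c + 1, p := PySem.Int.mod (s.p * m) 1000000007, mn := some x }
      else { s with c := s.c + 1, p := PySem.Int.mod (s.p * x) 1000000007 }

def findMaxProduct_alt (arr : List Int) : Int :=
  let M : Int := 10 ^ 9 + 7
  if arr.length = 1 then arr.headD 0
  else
    let s := arr.foldl bStep ⟨1, none, 0, false, false⟩
    if ¬ s.hp = true ∧ s.c = 0 then 0
    else if ¬ s.hp = true ∧ s.c = 1 then
      -- best subset is the single negative alone (or a zero if present)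
      if s.hz = true then 0
      else match s.mn with | none => 0 | some m => PySem.Int.mod m M
    else if PySem.Int.mod s.c 2 = 1 then s.p
    else match s.mn with | none => s.p | some m => PySem.Int.mod (s.p * m) M

-- ===== PRECONDITION & SPEC =====
def Spec_findMaxProduct (arr : List Int) (out : Int) : Prop := out = findMaxProduct_alt arr
instance (arr : List Int) (out : Int) : Decidable (Spec_findMaxProduct arr out) := by unfold Spec_findMaxProduct; infer_instance

-- ===== CLAIM (what is proved, stated in full; the proofs are below) =====
def Claim_equal_findMaxProduct : Prop := ∀ (arr : List Int), Dom_findMaxProduct arr → Spec_findMaxProduct arr (findMaxProduct arr)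

-- ===== LEMMAS AND PROOFS =====

def pvNegs (l : List Int) : List Int := l.filter (fun x => decide (x < 0))
def pvPoss (l : List Int) : List Int := l.filter (fun x => decide (0 < x))
def pvNzs (l : List Int) : List Int := l.filter (fun x => decide (x ≠ 0))
def pvProd (l : List Int) : Int := l.foldl (fun r e => r * e) 1
def pvMaxF (acc : Option Int) (x : Int) : Option Int :=
  some (match acc with | none => x | some m => max m x)
def pvMax? (l : List Int) : Option Int := l.foldl pvMaxF none
def pvOpt (o : Option Int) : Int := o.getD 1

theorem pv_foldl_mul (l : List Int) (a : Int) :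
    l.foldl (fun r e => r * e) a = a * pvProd l := by
  induction l generalizing a with
  | nil => simp [pvProd]
  | cons x t ih =>
    simp only [List.foldl_cons, pvProd]
    rw [ih (a * x), ih (1 * x)]
    ring

theorem pvProd_cons (x : Int) (t : List Int) : pvProd (x :: t) = x * pvProd t := by
  show (x :: t).foldl (fun r e => r * e) 1 = _
  rw [List.foldl_cons, pv_foldl_mul]
  ring

theorem pvProd_nil : pvProd ([] : List Int) = 1 := rfl

theorem pvProd_append (l₁ l₂ : List Int) : pvProd (l₁ ++ l₂) = pvProd l₁ * pvProd l₂ := by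
  show (l₁ ++ l₂).foldl (fun r e => r * e) 1 = _
  rw [List.foldl_append, pv_foldl_mul]
  rfl

theorem pvProd_perm {l₁ l₂ : List Int} (h : l₁.Perm l₂) : pvProd l₁ = pvProd l₂ :=
  h.foldl_eq' (fun x _ y _ z => by ring) 1

theorem pvMax?_perm {l₁ l₂ : List Int} (h : l₁.Perm l₂) : pvMax? l₁ = pvMax? l₂ := by
  refine h.foldl_eq' (fun x _ y _ z => ?_) none
  cases z <;> simp [pvMaxF] <;> omega

theorem pvMax?_mem_aux (l : List Int) (acc : Option Int) (m : Int)
    (h : l.foldl pvMaxF acc = some m) : m ∈ l ∨ acc = some m := by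
  induction l generalizing acc with
  | nil => right; exact h
  | cons x t ih =>
    rw [List.foldl_cons] at h
    rcases ih (pvMaxF acc x) h with hm | hm
    · left; exact List.mem_cons_of_mem _ hm
    · cases acc with
      | none =>
        simp only [pvMaxF] at hm
        left; rw [Option.some.injEq] at hm; rw [← hm]; exact List.mem_cons_self
      | some a =>
        simp only [pvMaxF, Option.some.injEq] at hm
        rcases le_total a x with hax | hax
        · left
          have : m = x := by omega
          rw [this]; exact List.mem_cons_self
        · right
          have : m = a := by omega
          rw [this]

theorem pvMax?_last (l : List Int) (x : Int) (hle : ∀ y ∈ l, y ≤ x) :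
    pvMax? (l ++ [x]) = some x := by
  show (l ++ [x]).foldl pvMaxF none = some x
  rw [List.foldl_append]
  cases h : l.foldl pvMaxF none with
  | none => simp [pvMaxF]
  | some m =>
    have hm : m ∈ l := by
      rcases pvMax?_mem_aux l none m h with hmem | hbad
      · exact hmem
      · cases hbad
    have : m ≤ x := hle m hm
    simp only [List.foldl_cons, List.foldl_nil, pvMaxF]
    rw [Option.some.injEq]
    omega

theorem pvProd_split (l : List Int) : pvProd (pvNzs l) = pvProd (pvNegs l) * pvProd (pvPoss l) := by
  induction l with
  | nil => simp [pvNzs, pvNegs, pvPoss, pvProd]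
  | cons x t ih =>
    simp only [pvNzs, pvNegs, pvPoss, List.filter_cons] at ih ⊢
    rcases lt_trichotomy x 0 with hx | hx | hx
    · have e1 : decide (x ≠ 0) = true := by simp; omega
      have e2 : decide (x < 0) = true := by simp [hx]
      have e3 : decide ((0 : Int) < x) = false := by simp; omega
      simp only [e1, e2, e3, if_true, if_false, Bool.false_eq_true, reduceIte]
      rw [pvProd_cons, pvProd_cons, ih]; ring
    · have e1 : decide (x ≠ 0) = false := by simp [hx]
      have e2 : decide (x < 0) = false := by simp [hx]
      have e3 : decide ((0 : Int) < x) = false := by simp [hx]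
      simp only [e1, e2, e3, Bool.false_eq_true, reduceIte]
      exact ih
    · have e1 : decide (x ≠ 0) = true := by simp; omega
      have e2 : decide (x < 0) = false := by simp; omega
      have e3 : decide ((0 : Int) < x) = true := by simp [hx]
      simp only [e1, e2, e3, if_true, if_false, Bool.false_eq_true, reduceIte]
      rw [pvProd_cons, pvProd_cons, ih]; ring

theorem pv_modM (a : Int) : PySem.Int.mod a 1000000007 = a % 1000000007 := by
  show a.fmod 1000000007 = _
  rw [Int.fmod_eq_emod]
  simp

theorem pv_mulmod (P y : Int) :
    PySem.Int.mod (PySem.Int.mod P 1000000007 * y) 1000000007 = PySem.Int.mod (P * y) 1000000007 := by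
  rw [pv_modM, pv_modM, pv_modM, Int.mul_emod, Int.emod_emod_of_dvd _ dvd_rfl, ← Int.mul_emod]

theorem bFold_char (l : List Int) :
    (l.foldl bStep ⟨1, none, 0, false, false⟩).hz = l.any (fun x => decide (x = 0)) ∧
    (l.foldl bStep ⟨1, none, 0, false, false⟩).hp = l.any (fun x => decide (0 < x)) ∧
    (l.foldl bStep ⟨1, none, 0, false, false⟩).c = ((pvNegs l).length : Int) ∧
    (l.foldl bStep ⟨1, none, 0, false, false⟩).mn = pvMax? (pvNegs l) ∧
    ∃ P : Int, (l.foldl bStep ⟨1, none, 0, false, false⟩).p = PySem.Int.mod P 1000000007 ∧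
      P * pvOpt (l.foldl bStep ⟨1, none, 0, false, false⟩).mn = pvProd (pvNzs l) := by
  induction l using List.reverseRecOn with
  | nil =>
    refine ⟨rfl, rfl, rfl, rfl, 1, ?_, rfl⟩
    rw [pv_modM]; rfl
  | append_singleton t x ih =>
    obtain ⟨ihz, ihp, ihc, ihm, P, hPm, hPe⟩ := ih
    rw [List.foldl_append] at *
    set s := t.foldl bStep ⟨1, none, 0, false, false⟩ with hs
    simp only [List.foldl_cons, List.foldl_nil]
    rcases lt_trichotomy x 0 with hx | hx | hx
    · -- negative element
      have h0 : x ≠ 0 := by omega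
      have h1 : ¬ (0 : Int) < x := by omega
      have hnegs : pvNegs (t ++ [x]) = pvNegs t ++ [x] := by
        simp [pvNegs, List.filter_append, List.filter_cons, hx]
      have hnzs : pvNzs (t ++ [x]) = pvNzs t ++ [x] := by
        simp [pvNzs, List.filter_append, h0]
      have hmax : pvMax? (pvNegs (t ++ [x])) = pvMaxF (pvMax? (pvNegs t)) x := by
        rw [hnegs]; show (pvNegs t ++ [x]).foldl pvMaxF none = _
        rw [List.foldl_append]; rfl
      cases hmn : s.mn with
      | none =>
        simp only [bStep, h0, h1, if_false, hmn, if_neg]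
        refine ⟨?_, ?_, ?_, ?_, P, ?_, ?_⟩
        · simpa [List.any_append, h0] using ihz
        · simpa [List.any_append, h1] using ihp
        · rw [hnegs]; simp only [List.length_append, List.length_cons, List.length_nil]
          push_cast; omega
        · rw [hmax, ← ihm, hmn]; rfl
        · exact hPm
        · rw [hnzs, pvProd_append, pvProd_cons, pvProd_nil]
          rw [hmn] at hPe
          simp only [pvOpt, Option.getD] at hPe ⊢
          rw [← hPe]; ring
      | some m =>
        by_cases hxm : x > m
        · simp only [bStep, h0, h1, if_false, hmn, hxm, if_true, if_pos]
          refine ⟨?_, ?_, ?_, ?_, P * m, ?_, ?_⟩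
          · simpa [List.any_append, h0] using ihz
          · simpa [List.any_append, h1] using ihp
          · rw [hnegs]; simp only [List.length_append, List.length_cons, List.length_nil]
            push_cast; omega
          · rw [hmax, ← ihm, hmn]
            simp only [pvMaxF, Option.some.injEq]
            omega
          · rw [hPm, pv_mulmod]
          · rw [hnzs, pvProd_append, pvProd_cons, pvProd_nil]
            rw [hmn] at hPe
            simp only [pvOpt, Option.getD_some] at hPe
            simp only [pvOpt, Option.getD_some]
            rw [← hPe]; ring
        · simp only [bStep, h0, h1, if_false, hmn, hxm, if_neg]
          refine ⟨?_, ?_, ?_, ?_, P * x, ?_, ?_⟩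
          · simpa [List.any_append, h0] using ihz
          · simpa [List.any_append, h1] using ihp
          · rw [hnegs]; simp only [List.length_append, List.length_cons, List.length_nil]
            push_cast; omega
          · rw [hmax, ← ihm, hmn]
            simp only [pvMaxF, Option.some.injEq]
            omega
          · rw [hPm, pv_mulmod]
          · rw [hnzs, pvProd_append, pvProd_cons, pvProd_nil]
            rw [hmn] at hPe
            simp only [pvOpt, Option.getD_some] at hPe
            simp only [pvOpt, Option.getD_some]
            rw [← hPe]; ring
    · -- zero element
      subst hx
      simp only [bStep, if_pos rfl]
      have hnegs : pvNegs (t ++ [(0 : Int)]) = pvNegs t := by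
        simp [pvNegs, List.filter_append, List.filter_cons]
      have hnzs : pvNzs (t ++ [(0 : Int)]) = pvNzs t := by
        simp [pvNzs, List.filter_append, List.filter_cons]
      exact ⟨by simp [List.any_append], by simpa [List.any_append] using ihp,
        by rw [hnegs]; exact ihc, by rw [hnegs]; exact ihm,
        P, hPm, by rw [hnzs]; exact hPe⟩
    · -- positive element
      have h0 : x ≠ 0 := by omega
      have h1 : ¬ x < (0 : Int) := by omega
      simp only [bStep, h0, if_false, if_pos hx, if_neg]
      have hnegs : pvNegs (t ++ [x]) = pvNegs t := by
        simp [pvNegs, List.filter_append, h1]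
      have hnzs : pvNzs (t ++ [x]) = pvNzs t ++ [x] := by
        simp [pvNzs, List.filter_append, h0]
      refine ⟨by simpa [List.any_append, h0] using ihz,
        by simp [List.any_append, hx], by rw [hnegs]; exact ihc,
        by rw [hnegs]; exact ihm, P * x, ?_, ?_⟩
      · rw [hPm, pv_mulmod]
      · rw [hnzs, pvProd_append, pvProd_cons, pvProd_nil, ← hPe]
        ring

theorem pv_mod_two (n : Nat) : PySem.Int.mod (n : Int) 2 = ((n % 2 : Nat) : Int) := by
  show (n : Int).fmod 2 = _
  rw [Int.fmod_eq_emod]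
  simp

theorem pv_nil_iff {l₁ l₂ : List Int} (h : l₁.Perm l₂) : l₁ = [] ↔ l₂ = [] := by
  constructor
  · intro he; rw [he] at h; exact h.symm.eq_nil
  · intro he; rw [he] at h; exact h.eq_nil

theorem pvProd_pos_of_pos (l : List Int) (h : ∀ x ∈ l, 0 < x) : 0 < pvProd l := by
  induction l with
  | nil => norm_num [pvProd_nil]
  | cons x t ih =>
    rw [pvProd_cons]
    exact mul_pos (h x List.mem_cons_self)
      (ih fun y hy => h y (List.mem_cons_of_mem _ hy))

theorem pvProd_sign_neg (l : List Int) :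
    (∀ x ∈ l, x < 0) →
    (l.length % 2 = 0 → 0 < pvProd l) ∧ (l.length % 2 = 1 → pvProd l < 0) := by
  induction l with
  | nil => intro _; constructor <;> intro h <;> simp_all [pvProd_nil]
  | cons x t ih =>
    intro h
    obtain ⟨ih0, ih1⟩ := ih fun y hy => h y (List.mem_cons_of_mem _ hy)
    have hx := h x List.mem_cons_self
    simp only [List.length_cons]
    constructor
    · intro hpar
      have ht : t.length % 2 = 1 := by omega
      rw [pvProd_cons]
      exact mul_pos_of_neg_of_neg hx (ih1 ht)
    · intro hpar
      have ht : t.length % 2 = 0 := by omega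
      rw [pvProd_cons]
      exact mul_neg_of_neg_of_pos hx (ih0 ht)

theorem pvMax?_some (t : List Int) (a : Int) : ∃ m, t.foldl pvMaxF (some a) = some m := by
  induction t generalizing a with
  | nil => exact ⟨a, rfl⟩
  | cons x t ih =>
    rw [List.foldl_cons]
    exact ih _

theorem pvMax?_eq_none_iff (l : List Int) : pvMax? l = none ↔ l = [] := by
  cases l with
  | nil => simp [pvMax?]
  | cons x t =>
    obtain ⟨m, hm⟩ := pvMax?_some t x
    show t.foldl pvMaxF (pvMaxF none x) = none ↔ _
    simp [pvMaxF, hm]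

-- ===== VERDICT (by name: the statement is the Claim_ definition above) =====
theorem findMaxProduct_spec : Claim_equal_findMaxProduct := by
  intro arr _
  unfold Spec_findMaxProduct findMaxProduct findMaxProduct_alt
  by_cases h1 : arr.length = 1
  · simp only [h1, if_true]
  · simp only [h1, if_false]
    have hM : ((10 : Int) ^ 9 + 7) = 1000000007 := by norm_num
    rw [hM]
    obtain ⟨hz, hp, hc, hm, P, hPm, hPe⟩ := bFold_char arr
    set s := arr.foldl bStep ⟨1, none, 0, false, false⟩ with hsdef
    set S := PySem.List.sorted arr (fun x => x) false with hSdef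
    have hperm : S.Perm arr := PySem.List.sorted_perm arr (fun x => x) false
    have hpermN : (pvNegs S).Perm (pvNegs arr) := hperm.filter _
    have hpermP : (pvPoss S).Perm (pvPoss arr) := hperm.filter _
    have eN : S.filter (fun x => decide (x < 0)) = pvNegs S := rfl
    have eP : S.filter (fun x => decide (0 < x)) = pvPoss S := rfl
    rw [eN, eP]
    have hzeq : s.hz = true ↔ (0 : Int) ∈ arr := by
      rw [hz]; simp only [List.any_eq_true, decide_eq_true_eq]
      exact ⟨fun ⟨x, hx, e⟩ => e ▸ hx, fun h => ⟨0, h, rfl⟩⟩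
    have hpeq : s.hp = true ↔ pvPoss S ≠ [] := by
      rw [hp]
      constructor
      · intro h hnilS
        have hnilA : pvPoss arr = [] := (pv_nil_iff hpermP).mp hnilS
        obtain ⟨x, hx, hx2⟩ := List.any_eq_true.mp h
        have : x ∈ pvPoss arr := List.mem_filter.mpr ⟨hx, hx2⟩
        rw [hnilA] at this
        exact (List.not_mem_nil) this
      · intro h
        obtain ⟨x, hx⟩ := List.exists_mem_of_ne_nil _ h
        have h2 := List.mem_filter.mp hx
        exact List.any_eq_true.mpr ⟨x, hperm.mem_iff.mp h2.1, h2.2⟩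
    have hceq : s.c = ((pvNegs S).length : Int) := by rw [hc, hpermN.length_eq]
    have hcnil : s.c = 0 ↔ pvNegs S = [] := by
      rw [hceq]
      constructor
      · intro h
        have : (pvNegs S).length = 0 := by omega
        exact List.length_eq_zero_iff.mp this
      · intro h; rw [h]; rfl
    have hmS : s.mn = pvMax? (pvNegs S) := by rw [hm, pvMax?_perm hpermN.symm]
    have hNall : ∀ x ∈ pvNegs S, x < 0 := by
      intro x hx
      have := (List.mem_filter.mp (hx : x ∈ S.filter (fun x => decide (x < 0)))).2
      simpa using this
    have hPall : ∀ x ∈ pvPoss S, 0 < x := by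
      intro x hx
      have := (List.mem_filter.mp (hx : x ∈ S.filter (fun x => decide (0 < x)))).2
      simpa using this
    have hprodsplit : pvProd (pvNegs S) * pvProd (pvPoss S) = pvProd (pvNzs arr) := by
      rw [pvProd_perm hpermN, pvProd_perm hpermP, ← pvProd_split]
    by_cases hout : pvNegs S ≠ [] ∨ pvPoss S ≠ []
    · rw [if_pos hout]
      have houtB : ¬ (¬ s.hp = true ∧ s.c = 0) := by
        rintro ⟨hnp, hc0⟩
        rcases hout with h | h
        · exact h (hcnil.mp hc0)
        · exact hnp (hpeq.mpr h)
      rw [if_neg houtB]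
      have hmod : PySem.Int.mod s.c 2 = 1 ↔ (pvNegs S).length % 2 ≠ 0 := by
        rw [hceq, pv_mod_two]; omega
      by_cases hmid : ¬ s.hp = true ∧ s.c = 1
      · -- single negative, no positives
        rw [if_pos hmid]
        obtain ⟨hnp, hc1⟩ := hmid
        have hlen1 : (pvNegs S).length = 1 := by rw [hceq] at hc1; omega
        obtain ⟨g, hgS⟩ := List.length_eq_one_iff.mp hlen1
        have hgneg : g < 0 := hNall g (by rw [hgS]; exact List.mem_cons_self)
        have hPnil : pvPoss S = [] := by
          by_contra h
          exact hnp (hpeq.mpr h)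
        have hpopA : ¬ ((pvPoss S ≠ [] ∨ (pvNegs S).length > 1) ∧ (pvNegs S).length % 2 ≠ 0) := by
          rintro ⟨hor, _⟩
          rcases hor with h | h
          · exact h hPnil
          · omega
        rw [if_neg hpopA, hgS, hPnil]
        have hres : ([] : List Int).foldl (fun r e => r * e) ([g].foldl (fun r e => r * e) 1) = g := by
          simp
        rw [hres]
        have hmng : s.mn = some g := by
          rw [hmS, hgS]
          show [g].foldl pvMaxF none = some g
          rfl
        rw [hmng]
        by_cases hz0 : (0 : Int) ∈ arr
        · rw [if_pos ⟨hgneg, hz0⟩, if_pos (hzeq.mpr hz0)]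
        · rw [if_neg (by rintro ⟨_, h⟩; exact hz0 h), if_neg (fun h => hz0 (hzeq.mp h))]
      · rw [if_neg hmid]
        by_cases hodd : PySem.Int.mod s.c 2 = 1
        · -- odd number of negatives: drop the largest
          rw [if_pos hodd]
          have hlodd : (pvNegs S).length % 2 = 1 := by
            have := hmod.mp hodd; omega
          have hne : pvNegs S ≠ [] := by
            intro h; rw [h] at hlodd; simp at hlodd
          have hpopA : (pvPoss S ≠ [] ∨ (pvNegs S).length > 1) ∧ (pvNegs S).length % 2 ≠ 0 := by
            refine ⟨?_, by omega⟩
            by_cases hP : pvPoss S = []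
            · right
              have : ¬ (¬ s.hp = true ∧ s.c = 1) := hmid
              have hnp : ¬ s.hp = true := fun h => (hpeq.mp h) hP
              have : s.c ≠ 1 := fun h => hmid ⟨hnp, h⟩
              rw [hceq] at this
              have h0 : (pvNegs S).length ≠ 0 := fun h => hne (List.length_eq_zero_iff.mp h)
              omega
            · exact Or.inl hP
          rw [if_pos hpopA]
          have hdecomp := List.dropLast_concat_getLast hne
          set g := (pvNegs S).getLast hne with hg
          have hpwS : S.Pairwise (fun a b => a ≤ b) := PySem.List.sorted_pairwise arr (fun x => x)
          have hpw : (pvNegs S).Pairwise (fun a b => a ≤ b) := hpwS.filter _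
          have hle : ∀ y ∈ (pvNegs S).dropLast, y ≤ g := by
            rw [← hdecomp] at hpw
            rw [List.pairwise_append] at hpw
            exact fun y hy => hpw.2.2 y hy g (List.mem_singleton.mpr rfl)
          have hmaxg : pvMax? (pvNegs S) = some g := by
            rw [← hdecomp]; exact pvMax?_last _ _ hle
          have hgneg : g < 0 := hNall g (List.getLast_mem hne)
          have hg0 : g ≠ 0 := by omega
          have hmng : s.mn = some g := by rw [hmS, hmaxg]
          have hPg : P * g = pvProd (pvNzs arr) := by
            rw [← hPe, hmng]; rfl
          have hNdec : pvProd (pvNegs S) = pvProd ((pvNegs S).dropLast) * g := by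
            conv_lhs => rw [← hdecomp]
            rw [pvProd_append, pvProd_cons, pvProd_nil]; ring
          have hPeq : P = pvProd ((pvNegs S).dropLast) * pvProd (pvPoss S) := by
            apply mul_right_cancel₀ hg0
            rw [hPg, ← hprodsplit, hNdec]
            ring
          rw [pv_foldl_mul, pv_foldl_mul, one_mul]
          have hrespos : 0 < pvProd ((pvNegs S).dropLast) * pvProd (pvPoss S) := by
            apply mul_pos
            · have hall : ∀ x ∈ (pvNegs S).dropLast, x < 0 :=
                fun x hx => hNall x (List.dropLast_subset _ hx)
              have hlen : ((pvNegs S).dropLast).length % 2 = 0 := by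
                rw [List.length_dropLast]
                have h0 : (pvNegs S).length ≠ 0 := fun h => hne (List.length_eq_zero_iff.mp h)
                omega
              exact (pvProd_sign_neg _ hall).1 hlen
            · exact pvProd_pos_of_pos _ hPall
          rw [if_neg (by rintro ⟨h, _⟩; omega)]
          rw [← hPeq, hPm]
        · -- even number of negatives: keep them all
          rw [if_neg hodd]
          have hleven : (pvNegs S).length % 2 = 0 := by
            by_contra h
            exact hodd (hmod.mpr h)
          have hpopA : ¬ ((pvPoss S ≠ [] ∨ (pvNegs S).length > 1) ∧ (pvNegs S).length % 2 ≠ 0) := by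
            rintro ⟨_, h⟩; omega
          rw [if_neg hpopA]
          rw [pv_foldl_mul, pv_foldl_mul, one_mul]
          have hrespos : 0 < pvProd (pvNegs S) * pvProd (pvPoss S) := by
            apply mul_pos
            · exact (pvProd_sign_neg _ hNall).1 hleven
            · exact pvProd_pos_of_pos _ hPall
          rw [if_neg (by rintro ⟨h, _⟩; omega)]
          cases hmn : s.mn with
          | none =>
            have hNnil : pvNegs S = [] := by
              rw [hmS] at hmn
              exact (pvMax?_eq_none_iff _).mp hmn
            have hP1 : P = pvProd (pvNegs S) * pvProd (pvPoss S) := by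
              rw [hprodsplit, ← hPe, hmn]
              simp [pvOpt]
            rw [hPm]
            show PySem.Int.mod (pvProd (pvNegs S) * pvProd (pvPoss S)) 1000000007 =
              PySem.Int.mod P 1000000007
            rw [hP1]
          | some g =>
            have hPg : P * g = pvProd (pvNegs S) * pvProd (pvPoss S) := by
              rw [hprodsplit, ← hPe, hmn]
              rfl
            rw [hPm]
            show PySem.Int.mod (pvProd (pvNegs S) * pvProd (pvPoss S)) 1000000007 =
              PySem.Int.mod (PySem.Int.mod P 1000000007 * g) 1000000007
            rw [pv_mulmod, hPg]
    · rw [if_neg hout]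
      push Not at hout
      obtain ⟨hn, hpnil⟩ := hout
      have : ¬ s.hp = true ∧ s.c = 0 := ⟨fun h => (hpeq.mp h) hpnil, hcnil.mpr hn⟩
      rw [if_pos this]
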